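-- pv_equiv track=rewrite | github.com/jordi-petit/ap1-codis-2022-2023 | 2022-10-18/alex.py | is_perfect_prime
-- ===== SOURCE A (Python) =====
-- def sum_digits(n: int) -> int: #Add up all the digits of a number. Precondition: n >= 0
--     i = 0
--
--     while (n > 0):
--         i += n % 10
--         n = n // 10
--     return (i)
--
-- def is_prime(n) -> bool: #Return if a number is prime or not. Precondition: n >= 0
--     a = 2
--
--     while (a*a <= n): #We can check whether a number is prime or not checking only it's divisibility by all the numbers up to sqrt(n)
--         if (n % a == 0):
--             return (False)
--         a += 1
--     return (True)
--
-- def is_perfect_prime(n: int) -> bool: #Return if a number is a perfect prime or not. Precondition: n >= 0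
--     if (n < 2):
--         return (False)
--     else:
--         if (n < 10):
--            return (is_prime(n)) #If the number has only one digit, check if it's prime or not.
--         else:
--             if (is_perfect_prime(sum_digits(n))): #Huga Buga python evaluating second condition after first one is false makes this conditional make sense :)
--                 return (is_prime(n)) #When n > 10, check if sum_digits(n) is a perfect prime and if is_prime(n).
-- ===== SOURCE B (Python) =====
-- def sum_digits(n: int) -> int:  # Add up all the digits of a number. Precondition: n >= 0
--     i = 0
--     while n > 0:
--         i += n % 10
--         n = n // 10
--     return i
--
--
-- def is_prime(n) -> bool:  # Trial division up to sqrt(n). Precondition: n >= 0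
--     a = 2
--     while a * a <= n:
--         if n % a == 0:
--             return False
--         a += 1
--     return True
--
--
-- def is_perfect_prime(n: int) -> bool:
--     # Iterative: walk the digit-sum chain with a loop instead of recursion.
--     if n < 2:
--         return False
--     m = n
--     while m >= 10:
--         m = sum_digits(m)
--         if m < 2 or not is_prime(m):
--             return False
--     return is_prime(n)
-- ===== Notes on version B (the rewrite author's own statement) =====
-- stated objective: simpler
-- what changed: Replaced the recursion over the digit-sum chain by a single iterative while-loop that walks the chain, returning False as soon as a chain element is non-prime instead of falling through with an implicit None.
-- outside the precondition, e.g. on is_perfect_prime(10): A returns None, B returns False; on is_perfect_prime(199): A returns None, B returns False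
import Mathlib
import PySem

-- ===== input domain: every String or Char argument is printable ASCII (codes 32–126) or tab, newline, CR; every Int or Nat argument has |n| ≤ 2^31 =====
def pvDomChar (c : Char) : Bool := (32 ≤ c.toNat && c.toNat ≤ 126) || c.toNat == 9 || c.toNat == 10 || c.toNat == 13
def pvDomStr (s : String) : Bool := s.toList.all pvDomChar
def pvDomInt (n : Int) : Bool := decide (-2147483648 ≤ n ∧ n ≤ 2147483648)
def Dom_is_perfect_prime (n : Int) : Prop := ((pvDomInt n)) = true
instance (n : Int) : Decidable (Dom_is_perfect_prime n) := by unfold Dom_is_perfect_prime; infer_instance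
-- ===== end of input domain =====

-- B replaces A's recursion over the digit-sum chain by one iterative loop (objective: simpler);
-- Pre_ excludes exactly the inputs on which Python A returns None instead of a bool.

-- ===== PORT A =====
-- sum_digits: the Python while-loop; the Nat fuel only makes the loop total
-- (n.toNat iterations always suffice: n shrinks by a factor 10 each step, and fuel 0 ↔ n ≤ 0, where the loop body never runs).
def sum_digits_fuel : Nat → Int → Int → Int
  | 0, _, i => i
  | f + 1, n, i =>
      if 0 < n then sum_digits_fuel f (PySem.Int.floordiv n 10) (i + PySem.Int.mod n 10)
      else i

def sum_digits (n : Int) : Int := sum_digits_fuel n.toNat n 0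

-- is_prime: trial division by a = 2, 3, … while a*a ≤ n; fuel n.toNat + 1 bounds the ≤ n - 1 iterations.
def is_prime_fuel : Nat → Int → Int → Bool
  | 0, _, _ => true
  | f + 1, n, a =>
      if a * a ≤ n then
        if PySem.Int.mod n a == 0 then false
        else is_prime_fuel f n (a + 1)
      else true

def is_prime_f (n : Int) : Bool := is_prime_fuel (n.toNat + 1) n 2

-- is_perfect_prime, recursive as in Python; fuel n.toNat + 1 bounds the chain depth (sum_digits n < n for n ≥ 10).
-- Python's fall-through `None` (chain broken) is ported as `false`; those inputs are excluded by Pre_.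
def is_perfect_prime_fuel : Nat → Int → Bool
  | 0, _ => false
  | f + 1, n =>
      if n < 2 then false
      else if n < 10 then is_prime_f n
      else if is_perfect_prime_fuel f (sum_digits n) then is_prime_f n
      else false

def is_perfect_prime (n : Int) : Bool := is_perfect_prime_fuel (n.toNat + 1) n

-- ===== PORT B =====
-- Source B's while-loop: m walks the digit-sum chain; returns false on a broken link, else is_prime(n).
def ipp_loop_fuel : Nat → Int → Int → Bool
  | 0, n, _ => is_prime_f n
  | f + 1, n, m =>
      if 10 ≤ m then
        if sum_digits m < 2 || !is_prime_f (sum_digits m) then false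
        else ipp_loop_fuel f n (sum_digits m)
      else is_prime_f n

def is_perfect_prime_alt (n : Int) : Bool :=
  if n < 2 then false
  else ipp_loop_fuel (n.toNat + 1) n n

-- ===== PRECONDITION & SPEC =====
-- pvDS m: the digit sum of m, stated mathematically via Nat.digits (independent of the ports' code).
def pvDS (m : Nat) : Nat := (Nat.digits 10 m).sum

-- pvChainOK m: every element of the digit-sum chain m, pvDS m, pvDS (pvDS m), … down to a single
-- digit is ≥ 2 and prime.  The first argument is only a structural-recursion bound: since
-- pvDS m < m for every m ≥ 10, the value never depends on it once it is ≥ m (proved in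
-- pvChainOKF_fuel_irrel below), so pvChainOK is the EXACT chain condition for every m — no size
-- or depth cap of any kind.
def pvChainOKF : Nat → Nat → Bool
  | 0, _ => false
  | f + 1, m =>
      if m < 2 then false
      else if m < 10 then decide (Nat.Prime m)
      else pvChainOKF f (pvDS m) && decide (Nat.Prime m)

def pvChainOK (m : Nat) : Bool := pvChainOKF m m

-- Pre_ excludes exactly the inputs on which Python A falls off the end and returns None (no bool):
-- those inputs of at least ten whose digit-sum chain contains a non-prime element (one or composite).
def Pre_is_perfect_prime (n : Int) : Prop :=
  n < 10 ∨ pvChainOK (pvDS n.toNat) = true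

instance (n : Int) : Decidable (Pre_is_perfect_prime n) := by
  unfold Pre_is_perfect_prime; infer_instance

def pvWitness_is_perfect_prime : Int := (23)

def Spec_is_perfect_prime (n : Int) (out : Bool) : Prop := out = is_perfect_prime_alt n
instance (n : Int) (out : Bool) : Decidable (Spec_is_perfect_prime n out) := by
  unfold Spec_is_perfect_prime; infer_instance

-- ===== CLAIM (what is proved, stated in full; the proofs are below) =====
def Claim_equal_is_perfect_prime : Prop :=
  ∀ (n : Int), Dom_is_perfect_prime n → Pre_is_perfect_prime n →
    Spec_is_perfect_prime n (is_perfect_prime n)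

-- ===== LEMMAS AND PROOFS =====

-- pvDS m ≤ m, and pvDS m < m once m ≥ 10.
theorem pvDS_le (m : Nat) : pvDS m ≤ m := by
  induction m using Nat.strong_induction_on with
  | _ m ih =>
    rcases Nat.eq_zero_or_pos m with h0 | hpos
    · subst h0; simp [pvDS]
    · unfold pvDS
      rw [Nat.digits_def' (by norm_num : 1 < 10) hpos]
      simp only [List.sum_cons]
      have := ih (m / 10) (Nat.div_lt_self hpos (by norm_num))
      unfold pvDS at this
      omega

theorem pvDS_lt (m : Nat) (hm : 10 ≤ m) : pvDS m < m := by
  unfold pvDS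
  rw [Nat.digits_def' (by norm_num : 1 < 10) (by omega)]
  simp only [List.sum_cons]
  have := pvDS_le (m / 10)
  unfold pvDS at this
  omega

-- The fuel of pvChainOKF is irrelevant once it is ≥ the argument.
theorem pvChainOKF_fuel_irrel (f₁ : Nat) : ∀ (f₂ m : Nat), m ≤ f₁ → m ≤ f₂ →
    pvChainOKF f₁ m = pvChainOKF f₂ m := by
  induction f₁ with
  | zero =>
      intro f₂ m h1 _
      interval_cases m
      cases f₂ <;> simp [pvChainOKF]
  | succ f₁ ih =>
      intro f₂ m h1 h2
      cases f₂ with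
      | zero =>
          interval_cases m
          simp [pvChainOKF]
      | succ f₂ =>
          rw [pvChainOKF, pvChainOKF]
          by_cases hm2 : m < 2
          · rw [if_pos hm2, if_pos hm2]
          · rw [if_neg hm2, if_neg hm2]
            by_cases hm10 : m < 10
            · rw [if_pos hm10, if_pos hm10]
            · rw [if_neg hm10, if_neg hm10]
              have hlt := pvDS_lt m (by omega)
              rw [ih f₂ (pvDS m) (by omega) (by omega)]

-- Unfolding pvChainOK one chain step (exact, any m).
theorem pvChainOK_spec (m : Nat) (h : pvChainOK m = true) :
    2 ≤ m ∧ Nat.Prime m ∧ (10 ≤ m → pvChainOK (pvDS m) = true) := by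
  unfold pvChainOK at h
  rcases Nat.eq_zero_or_pos m with h0 | hpos
  · subst h0; simp [pvChainOKF] at h
  · obtain ⟨f, hf⟩ : ∃ f, m = f + 1 := ⟨m - 1, by omega⟩
    subst hf
    rw [pvChainOKF] at h
    by_cases hm2 : (f + 1 : Nat) < 2
    · rw [if_pos hm2] at h; exact absurd h (by simp)
    · rw [if_neg hm2] at h
      by_cases hm10 : (f + 1 : Nat) < 10
      · rw [if_pos hm10] at h
        exact ⟨by omega, by simpa using h, by omega⟩
      · rw [if_neg hm10] at h
        simp only [Bool.and_eq_true, decide_eq_true_eq] at h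
        refine ⟨by omega, h.2, fun _ => ?_⟩
        have hlt := pvDS_lt (f + 1) (by omega)
        unfold pvChainOK
        rw [← pvChainOKF_fuel_irrel f (pvDS (f+1)) (pvDS (f+1)) (by omega) le_rfl]
        exact h.1

-- The fueled sum_digits loop computes the mathematical digit sum (fuel n suffices: n shrinks each step).
theorem sum_digits_fuel_eq (f : Nat) : ∀ (n : Nat), n ≤ f → ∀ (i : Int),
    sum_digits_fuel f (n : Int) i = i + ((Nat.digits 10 n).sum : Int) := by
  induction f with
  | zero => intro n hn i; interval_cases n; simp [sum_digits_fuel]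
  | succ f ih =>
      intro n hn i
      rcases Nat.eq_zero_or_pos n with h0 | hpos
      · subst h0; simp [sum_digits_fuel]
      · rw [sum_digits_fuel, if_pos (by exact_mod_cast hpos)]
        have hfd : PySem.Int.floordiv (n : Int) 10 = ((n / 10 : Nat) : Int) := by
          exact_mod_cast PySem.Int.floordiv_natCast n 10
        have hmd : PySem.Int.mod (n : Int) 10 = ((n % 10 : Nat) : Int) := by
          exact_mod_cast PySem.Int.mod_natCast n 10
        rw [hfd, hmd]
        rw [ih (n / 10) (by omega) _]
        rw [Nat.digits_def' (by norm_num : 1 < 10) hpos]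
        simp only [List.sum_cons]
        push_cast
        ring

theorem sum_digits_eq_pvDS (n : Int) (hn : 0 ≤ n) : sum_digits n = (pvDS n.toNat : Int) := by
  unfold sum_digits pvDS
  have h : n = ((n.toNat : Nat) : Int) := by omega
  rw [h]
  simp only [Int.toNat_natCast]
  rw [sum_digits_fuel_eq n.toNat n.toNat le_rfl 0]
  simp

-- The trial-division loop decides "no divisor b with a ≤ b and b*b ≤ m" (fuel m + 1 suffices).
theorem is_prime_fuel_iff (f : Nat) : ∀ (m a : Int), 0 ≤ m → 2 ≤ a → m < a + f →
    (is_prime_fuel f m a = true ↔ ∀ b : Int, a ≤ b → b * b ≤ m → ¬ b ∣ m) := by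
  induction f with
  | zero =>
      intro m a hm ha hf
      rw [is_prime_fuel]
      constructor
      · intro _ b hb hbb _
        have hab : a * a ≤ b * b := mul_le_mul hb hb (by omega) (by omega)
        push_cast at hf
        nlinarith
      · intro _; rfl
  | succ f ih =>
      intro m a hm ha hf
      rw [is_prime_fuel]
      by_cases hle : a * a ≤ m
      · rw [if_pos hle]
        by_cases hd : PySem.Int.mod m a = 0
        · have hdvd : a ∣ m := (PySem.Int.mod_eq_zero_iff_dvd m a).mp hd
          simp only [hd]
          constructor
          · intro h; exact absurd h (by simp)
          · intro h; exact absurd hdvd (h a le_rfl hle)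
        · have hnd : ¬ a ∣ m := fun hdvd =>
            hd ((PySem.Int.mod_eq_zero_iff_dvd m a).mpr hdvd)
          rw [if_neg (by simpa using hd)]
          rw [ih m (a + 1) hm (by omega) (by omega)]
          constructor
          · intro h b hb hbb
            rcases eq_or_lt_of_le hb with rfl | hlt
            · exact hnd
            · exact h b (by omega) hbb
          · intro h b hb hbb; exact h b (by omega) hbb
      · rw [if_neg hle]
        constructor
        · intro _ b hb hbb _
          have hab : a * a ≤ b * b := mul_le_mul hb hb (by omega) (by omega)
          exact hle (by linarith)
        · intro _; rfl

theorem is_prime_f_iff_prime (m : Int) (hm : 2 ≤ m) :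
    is_prime_f m = true ↔ Nat.Prime m.toNat := by
  unfold is_prime_f
  rw [is_prime_fuel_iff (m.toNat + 1) m 2 (by omega) le_rfl (by omega)]
  rw [Nat.prime_def_le_sqrt]
  constructor
  · intro h
    refine ⟨by omega, fun c hc hcs hdvd => ?_⟩
    have h1 : c * c ≤ m.toNat := Nat.le_sqrt.mp hcs
    have hcc : (c : Int) * c ≤ m := by
      have h2 : ((c * c : Nat) : Int) ≤ ((m.toNat : Nat) : Int) := by exact_mod_cast h1
      push_cast at h2; omega
    exact h (c : Int) (by exact_mod_cast hc) hcc
      (by rw [show m = ((m.toNat : Nat) : Int) by omega]; exact_mod_cast hdvd)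
  · intro ⟨_, h⟩ b hb hbb hdvd
    have hbn : ((b.toNat : Nat) : Int) = b := by omega
    have hsq : b.toNat * b.toNat ≤ m.toNat := by
      have h2 : ((b.toNat * b.toNat : Nat) : Int) ≤ ((m.toNat : Nat) : Int) := by
        push_cast; rw [hbn]; omega
      exact_mod_cast h2
    refine h b.toNat (by omega) (Nat.le_sqrt.mpr hsq) ?_
    have h3 : ((b.toNat : Nat) : Int) ∣ ((m.toNat : Nat) : Int) := by
      rw [hbn, show ((m.toNat : Nat) : Int) = m by omega]; exact hdvd
    exact_mod_cast h3

theorem is_prime_f_of_chain (m : Nat) (h2 : 2 ≤ m) (hp : Nat.Prime m) :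
    is_prime_f (m : Int) = true := by
  rw [is_prime_f_iff_prime (m : Int) (by exact_mod_cast h2)]
  simpa using hp

-- A's recursion returns true at every chain-certified m (fuel ≥ m suffices: the chain decreases).
theorem chain_A (f : Nat) : ∀ (m : Nat), m ≤ f → pvChainOK m = true →
    is_perfect_prime_fuel (f + 1) (m : Int) = true := by
  induction f with
  | zero =>
      intro m hm h
      interval_cases m
      exact absurd (pvChainOK_spec 0 h).1 (by omega)
  | succ f ih =>
      intro m hm h
      obtain ⟨h2, hp, hch⟩ := pvChainOK_spec m h
      rw [is_perfect_prime_fuel, if_neg (by exact_mod_cast not_lt.mpr (show (2:Int) ≤ m by exact_mod_cast h2))]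
      by_cases h10 : m < 10
      · rw [if_pos (by exact_mod_cast h10)]
        exact is_prime_f_of_chain m h2 hp
      · rw [if_neg (by exact_mod_cast h10)]
        have hds := sum_digits_eq_pvDS (m : Int) (by positivity)
        simp only [Int.toNat_natCast] at hds
        have hlt := pvDS_lt m (by omega)
        rw [hds, ih (pvDS m) (by omega) (hch (by omega)), if_pos rfl]
        exact is_prime_f_of_chain m h2 hp

-- B's loop returns is_prime n whenever, from state m on, the rest of the chain is certified.
theorem chain_B (f : Nat) : ∀ (m : Nat) (n : Int), m ≤ f →
    (10 ≤ m → pvChainOK (pvDS m) = true) →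
    ipp_loop_fuel (f + 1) n (m : Int) = is_prime_f n := by
  induction f with
  | zero =>
      intro m n hm _
      interval_cases m
      rw [ipp_loop_fuel, if_neg (by norm_num)]
  | succ f ih =>
      intro m n hm hch
      by_cases h10 : 10 ≤ m
      · obtain ⟨h2, hp, hch'⟩ := pvChainOK_spec (pvDS m) (hch h10)
        have hds := sum_digits_eq_pvDS (m : Int) (by positivity)
        simp only [Int.toNat_natCast] at hds
        have hlt := pvDS_lt m h10
        rw [ipp_loop_fuel, if_pos (by exact_mod_cast h10), hds,
          if_neg (by simp [is_prime_f_of_chain (pvDS m) h2 hp]; exact_mod_cast h2)]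
        exact ih (pvDS m) n (by omega) (fun h => hch' h)
      · rw [ipp_loop_fuel, if_neg (by exact_mod_cast h10)]

-- ===== VERDICT (by name: the statement is the Claim_ definition above) =====
theorem is_perfect_prime_spec : Claim_equal_is_perfect_prime := by
  intro n _hdom hpre
  unfold Spec_is_perfect_prime is_perfect_prime is_perfect_prime_alt
  by_cases h2 : n < 2
  · rw [is_perfect_prime_fuel, if_pos h2, if_pos h2]
  · rw [if_neg h2]
    by_cases h10 : n < 10
    · rw [is_perfect_prime_fuel, if_neg h2, if_pos h10,
        ipp_loop_fuel, if_neg (by omega)]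
    · rcases hpre with h | hch
      · omega
      have hn : n = ((n.toNat : Nat) : Int) := by omega
      have hA : is_perfect_prime_fuel (n.toNat + 1) n = is_prime_f n := by
        have hds := sum_digits_eq_pvDS n (by omega)
        have hlt : pvDS n.toNat < n.toNat := pvDS_lt n.toNat (by omega)
        rw [is_perfect_prime_fuel, if_neg h2, if_neg h10]
        have hthis : is_perfect_prime_fuel ((n.toNat - 1) + 1) ((pvDS n.toNat : Nat) : Int) = true :=
          chain_A (n.toNat - 1) (pvDS n.toNat) (by omega) hch
        rw [show n.toNat = (n.toNat - 1) + 1 by omega, hds, hthis, if_pos rfl]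
      have hB : ipp_loop_fuel (n.toNat + 1) n n = is_prime_f n := by
        have : ipp_loop_fuel (n.toNat + 1) n ((n.toNat : Nat) : Int) = is_prime_f n :=
          chain_B n.toNat n.toNat n le_rfl (fun _ => hch)
        rwa [← hn] at this
      rw [hA, hB]
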